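-- pv_equiv track=rewrite | github.com/miliar/Code_Jam_Webscraper | solutions_python/Problem_181/662.py | compute_last_word
-- ===== SOURCE A (Python) =====
-- def index_of_largest_char(S):
--     largest_letter = max(S)
--     index = len(S) - 1
--
--     while S[index] != largest_letter:
--         index -= 1
--
--     return index
--
-- def compute_last_word(S):
--     if len(S) <= 2:
--         return sorted([S, S[::-1]])[-1]
--
--     index = index_of_largest_char(S)
--     letter = S[index]
--
--     first_part = S[:index]
--     second_part = S[index+1:]
--     return str(letter) + str(compute_last_word(first_part)) + str(second_part)
-- ===== SOURCE B (Python) =====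
-- def compute_last_word(S):
--     # Single left-to-right greedy: a letter >= the current first letter goes to
--     # the front, anything smaller goes to the back.  "front" holds the prepended
--     # letters with the current first letter last; the word is reversed(front)+back.
--     front = []
--     back = []
--     for c in S:
--         if front and c < front[-1]:
--             back.append(c)
--         else:
--             front.append(c)
--     front.reverse()
--     return ''.join(front) + ''.join(back)
-- ===== Notes on version B (the rewrite author's own statement) =====
-- stated objective: faster
-- what changed: Replaced A's recursive find-last-max-then-slice scheme (repeated max scans, slicing and string concatenation) by a single left-to-right greedy pass that prepends a letter when it is >= the current first letter and appends it otherwise, using two lists so the word is assembled once at the end.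
import Mathlib
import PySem

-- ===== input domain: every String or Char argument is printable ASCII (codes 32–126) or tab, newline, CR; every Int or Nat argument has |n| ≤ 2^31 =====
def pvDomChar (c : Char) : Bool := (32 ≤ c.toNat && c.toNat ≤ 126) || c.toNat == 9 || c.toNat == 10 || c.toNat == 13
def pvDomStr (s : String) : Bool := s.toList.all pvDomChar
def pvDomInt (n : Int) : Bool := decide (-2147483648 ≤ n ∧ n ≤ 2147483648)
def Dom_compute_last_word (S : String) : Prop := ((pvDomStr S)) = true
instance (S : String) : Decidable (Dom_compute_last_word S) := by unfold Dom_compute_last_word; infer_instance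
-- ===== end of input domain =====

-- B replaces A's recursive find-last-max/slice/concat scheme (O(n^2)) by one greedy
-- left-to-right pass building the word from two end-lists (O(n)); same return value.

-- ===== PORT A =====
-- the `while S[index] != largest_letter: index -= 1` loop, counting down from i
def pvWhile (s : List Char) (L : Char) : Nat → Nat
  | 0 => 0
  | i + 1 => if s[i + 1]? = some L then i + 1 else pvWhile s L i

-- index_of_largest_char(S); at every call site S is nonempty, so max(S) exists
def pvIndexOfLargest (s : List Char) : Nat :=
  let L := (PySem.List.max? s (fun x => x)).getD 'a'
  pvWhile s L (s.length - 1)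

-- bound used by compute_last_word's own termination argument (cited in decreasing_by)
theorem pvWhile_le (s : List Char) (L : Char) (i : Nat) : pvWhile s L i ≤ i := by
  induction i with
  | zero => simp [pvWhile]
  | succ n ih => unfold pvWhile; split <;> omega

def pvLastWordA (s : List Char) : List Char :=
  if s.length ≤ 2 then
    -- sorted([S, S[::-1]])[-1]
    (((PySem.List.sorted
        [String.ofList s, String.ofList ((PySem.List.slice? s none none (-1)).getD [])]
        (fun x => x) false) |> (PySem.List.pyGet? · (-1))).getD "").toList
  else
    let index := pvIndexOfLargest s
    let letter := (PySem.List.pyGet? s (index : Int)).getD 'a'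
    let first_part := PySem.List.slice s none (some (index : Int))
    let second_part := PySem.List.slice s (some ((index : Int) + 1)) none
    letter :: pvLastWordA first_part ++ second_part
  termination_by s.length
  decreasing_by
    have h1 : pvIndexOfLargest s ≤ s.length - 1 := pvWhile_le _ _ _
    simp [PySem.List.slice_to_natCast, List.length_take]
    omega

def compute_last_word (S : String) : String := String.ofList (pvLastWordA S.toList)

-- ===== PORT B =====
-- one step of the greedy loop: append to `back` iff front is nonempty and c < front[-1]
def pvStep (fb : List Char × List Char) (c : Char) : List Char × List Char :=
  match fb.1.getLast? with
  | some h => if c < h then (fb.1, fb.2 ++ [c]) else (fb.1 ++ [c], fb.2)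
  | none => (fb.1 ++ [c], fb.2)

def compute_last_word_alt (S : String) : String :=
  let fb := S.toList.foldl pvStep ([], [])
  String.ofList (fb.1.reverse ++ fb.2)

-- ===== PRECONDITION & SPEC =====
def Spec_compute_last_word (S : String) (out : String) : Prop := out = compute_last_word_alt S
instance (S : String) (out : String) : Decidable (Spec_compute_last_word S out) := by unfold Spec_compute_last_word; infer_instance

-- ===== CLAIM (what is proved, stated in full; the proofs are below) =====
def Claim_equal_compute_last_word : Prop := ∀ (S : String), Dom_compute_last_word S → Spec_compute_last_word S (compute_last_word S)

-- ===== LEMMAS AND PROOFS =====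
-- the word the greedy state denotes
def pvWord (fb : List Char × List Char) : List Char := fb.1.reverse ++ fb.2

-- every letter in the greedy state came from the input consumed so far
theorem pvStep_mem (fb : List Char × List Char) (c x : Char)
    (hx : x ∈ (pvStep fb c).1 ∨ x ∈ (pvStep fb c).2) :
    x ∈ fb.1 ∨ x ∈ fb.2 ∨ x = c := by
  unfold pvStep at hx
  rcases h : fb.1.getLast? with _ | h₀
  · simp [h] at hx; tauto
  · simp only [h] at hx
    split at hx <;> simp at hx <;> tauto

theorem pvFold_mem (u : List Char) (fb : List Char × List Char) (x : Char)
    (hx : x ∈ (u.foldl pvStep fb).1 ∨ x ∈ (u.foldl pvStep fb).2) :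
    x ∈ fb.1 ∨ x ∈ fb.2 ∨ x ∈ u := by
  induction u generalizing fb with
  | nil => simpa using hx
  | cons c t ih =>
    simp only [List.foldl_cons] at hx
    rcases ih _ hx with h | h | h
    · rcases pvStep_mem fb c x (Or.inl h) with h' | h' | h' <;> simp [h']
    · rcases pvStep_mem fb c x (Or.inr h) with h' | h' | h' <;> simp [h']
    · simp [h]

-- all of v strictly below the current first letter m: every letter of v is appended
theorem pvFold_append (v : List Char) (f b : List Char) (m : Char)
    (hv : ∀ x ∈ v, x < m) :
    v.foldl pvStep (f ++ [m], b) = (f ++ [m], b ++ v) := by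
  induction v generalizing b with
  | nil => simp
  | cons c t ih =>
    have hc : c < m := hv c (by simp)
    simp only [List.foldl_cons, pvStep, List.getLast?_concat]
    simp only [hc, if_pos]
    rw [ih _ (fun x hx => hv x (by simp [hx]))]
    simp

-- a letter m ≥ everything seen so far is prepended
theorem pvStep_prepend (f b : List Char) (m : Char)
    (hm : ∀ x ∈ f, x ≤ m) : pvStep (f, b) m = (f ++ [m], b) := by
  unfold pvStep
  rcases h : f.getLast? with _ | h₀
  · rfl
  · have : h₀ ∈ f := List.mem_of_getLast? h
    have : ¬ m < h₀ := not_lt.mpr (hm _ this)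
    simp [this]

-- pvWhile finds the LAST index ≤ i carrying L (when one exists)
theorem pvWhile_spec (s : List Char) (L : Char) (i : Nat)
    (h : ∃ j, j ≤ i ∧ s[j]? = some L) :
    s[pvWhile s L i]? = some L ∧ ∀ j, pvWhile s L i < j → j ≤ i → s[j]? ≠ some L := by
  induction i with
  | zero =>
    obtain ⟨j, hj, hsj⟩ := h
    interval_cases j
    exact ⟨by simpa [pvWhile] using hsj, by omega⟩
  | succ n ih =>
    by_cases hn : s[n + 1]? = some L
    · refine ⟨by simp [pvWhile, hn], ?_⟩
      intro j h1 h2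
      unfold pvWhile at h1
      rw [if_pos hn] at h1
      omega
    · have h' : ∃ j, j ≤ n ∧ s[j]? = some L := by
        obtain ⟨j, hj, hsj⟩ := h
        exact ⟨j, by rcases Nat.lt_succ_iff_lt_or_eq.mp (Nat.lt_succ_of_le hj) with h | h
                     · omega
                     · subst h; exact absurd hsj hn, hsj⟩
      obtain ⟨h1, h2⟩ := ih h'
      refine ⟨by simpa [pvWhile, hn] using h1, ?_⟩
      intro j hj1 hj2
      unfold pvWhile at hj1
      rw [if_neg hn] at hj1
      rcases Nat.le_succ_iff.mp hj2 with h | h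
      · exact h2 j hj1 h
      · subst h; exact hn

-- main invariant: A's recursion computes exactly the greedy word
theorem pvMainAux : ∀ (n : Nat) (s : List Char), s.length ≤ n →
    pvLastWordA s = pvWord (s.foldl pvStep ([], [])) := by
  intro n
  induction n with
  | zero =>
    intro s hs
    have : s = [] := List.eq_nil_of_length_eq_zero (by omega)
    subst this
    unfold pvLastWordA
    simp [PySem.List.slice?_none_none_neg_one, PySem.List.sorted, PySem.List.insertBy,
      PySem.List.pyGet?_neg_one, pvWord]
  | succ n ih =>
    intro s hs
    by_cases hlen : s.length ≤ 2
    · -- base case of A: length ≤ 2, both sides computed explicitly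
      match s, hlen with
      | [], _ =>
        unfold pvLastWordA
        simp [PySem.List.slice?_none_none_neg_one, PySem.List.sorted, PySem.List.insertBy,
          PySem.List.pyGet?_neg_one, pvWord]
      | [a], _ =>
        unfold pvLastWordA
        simp [PySem.List.slice?_none_none_neg_one, PySem.List.sorted, PySem.List.insertBy,
          PySem.List.pyGet?_neg_one, pvWord, List.foldl, pvStep]
      | [a, b], _ =>
        unfold pvLastWordA
        by_cases hba : b < a
        · have hlt : [b, a] < [a, b] := by
            rw [List.cons_lt_cons_iff]; exact Or.inl hba
          simp [PySem.List.slice?_none_none_neg_one, PySem.List.sorted, PySem.List.insertBy,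
            PySem.List.pyGet?_neg_one, hlt, pvWord, List.foldl, pvStep, hba]
        · have hlt : ¬ [b, a] < [a, b] := by
            rw [List.cons_lt_cons_iff]
            rintro (h | ⟨rfl, h⟩)
            · exact hba h
            · exact absurd h (lt_irrefl _)
          simp [PySem.List.slice?_none_none_neg_one, PySem.List.sorted, PySem.List.insertBy,
            PySem.List.pyGet?_neg_one, hlt, pvWord, List.foldl, pvStep, hba]
    · -- recursive case: length ≥ 3
      have hne : s ≠ [] := by intro h; subst h; simp at hlen
      obtain ⟨M, hM⟩ : ∃ M, PySem.List.max? s (fun x => x) = some M := by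
        rcases h : PySem.List.max? s (fun x => x) with _ | M
        · rw [PySem.List.max?_eq_none_iff] at h; exact absurd h hne
        · exact ⟨M, rfl⟩
      have hMmem : M ∈ s := PySem.List.max?_mem hM
      have hMmax : ∀ y ∈ s, y ≤ M := PySem.List.max?_isMax hM
      obtain ⟨j₀, hj₀, hsj₀⟩ := List.mem_iff_getElem.mp hMmem
      set i := pvIndexOfLargest s with hi
      have hwhile := pvWhile_spec s M (s.length - 1)
        ⟨j₀, by omega, by rw [List.getElem?_eq_getElem hj₀, hsj₀]⟩
      have hiw : i = pvWhile s M (s.length - 1) := by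
        rw [hi]; unfold pvIndexOfLargest; rw [hM]; rfl
      obtain ⟨hfound, hlast⟩ := hwhile
      rw [← hiw] at hfound hlast
      have hilt : i < s.length ∧ s[i]'(by
          rcases List.getElem?_eq_some_iff.mp hfound with ⟨h, _⟩; exact h) = M := by
        rcases List.getElem?_eq_some_iff.mp hfound with ⟨h1, h2⟩
        exact ⟨h1, h2⟩
      obtain ⟨hiltl, hsi⟩ := hilt
      -- unfold A one step
      rw [pvLastWordA]
      rw [if_neg hlen]
      have hcast : ((i : Int) + 1) = (((i + 1 : Nat)) : Int) := by push_cast; ring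
      simp only [← hi, hcast, PySem.List.pyGet?_natCast, hfound, Option.getD_some,
        PySem.List.slice_to_natCast, PySem.List.slice_from_natCast]
      -- decompose s
      have hdecomp : s = s.take i ++ M :: s.drop (i + 1) := by
        conv_lhs => rw [← List.take_append_drop i s]
        rw [List.drop_eq_getElem_cons hiltl, hsi]
      -- the greedy fold over the decomposition
      set u := s.take i with hu
      set v := s.drop (i + 1) with hv
      have hmemu : ∀ x ∈ u, x ≤ M := fun x hx =>
        hMmax x (List.mem_of_mem_take hx)
      have hmemv : ∀ x ∈ v, x < M := by
        intro x hx
        rw [hv] at hx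
        obtain ⟨k, hk, hxk⟩ := List.mem_iff_getElem.mp hx
        have hklen : i + 1 + k < s.length := by
          rw [List.length_drop] at hk; omega
        have hget : s[i + 1 + k]'hklen = x := by
          rw [← hxk]; simp [List.getElem_drop]
        have hne' : s[i + 1 + k]? ≠ some M := by
          apply hlast
          · omega
          · omega
        refine lt_of_le_of_ne (hMmax x (by rw [← hget]; exact List.getElem_mem _)) ?_
        intro hxM
        apply hne'
        rw [List.getElem?_eq_getElem hklen, hget, hxM]
      have hfold : s.foldl pvStep ([], []) = (((u.foldl pvStep ([], [])).1) ++ [M],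
          ((u.foldl pvStep ([], [])).2) ++ v) := by
        conv_lhs => rw [hdecomp]
        rw [← List.singleton_append, ← List.append_assoc, List.foldl_append,
          List.foldl_append]
        set fb := u.foldl pvStep ([], []) with hfb
        have hprep : (fb.1, fb.2) = fb := rfl
        have hstep : pvStep fb M = (fb.1 ++ [M], fb.2) := by
          rw [← hprep]
          exact pvStep_prepend fb.1 fb.2 M (fun x hx =>
            hmemu x (by
              rcases pvFold_mem u ([], []) x (Or.inl (by rw [hfb] at hx; exact hx)) with
                h | h | h
              · simp at h
              · simp at h
              · exact h))
        simp only [List.foldl_cons, List.foldl_nil, hstep]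
        exact pvFold_append v fb.1 fb.2 M hmemv
      rw [hfold]
      -- IH on the prefix
      have hulen : u.length ≤ n := by
        rw [hu, List.length_take]; omega
      rw [ih u hulen]
      simp [pvWord, List.append_assoc]
theorem pvMain (s : List Char) : pvLastWordA s = pvWord (s.foldl pvStep ([], [])) :=
  pvMainAux s.length s le_rfl

-- ===== VERDICT (by name: the statement is the Claim_ definition above) =====
theorem compute_last_word_spec : Claim_equal_compute_last_word := by
  intro S _
  unfold Spec_compute_last_word compute_last_word compute_last_word_alt
  rw [pvMain]
  rfl
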